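-- pv_equiv track=rewrite | github.com/helenijevans/coding-challenges-slack | controlc_controlv/coding_challenge.py | challenge
-- ===== SOURCE A (Python) =====
-- def get_word_list(string):
--     string = string.replace('[', ' [')
--     string = string.replace(']', '] ')
--     return string.split()
--
-- def challenge(string):
--     copy_command_hit = False
--     copy_command = "[CTRL+C]"
--     paste_command = "[CTRL+V]"
--     clear_command = "[CTRL+X]"
--     clipboard = []
--     manipulated_string = []
--     string_list = get_word_list(string)
--     for word in string_list:
--         if word == clear_command:
--             clipboard.clear()
--         if word != copy_command and word != clear_command and word != paste_command:
--             if not copy_command_hit: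
--                 clipboard.append(word)
--             manipulated_string.append(word)
--         if word == copy_command:
--             copy_command_hit = True
--         elif word == paste_command and copy_command_hit:
--             manipulated_string.append(' '.join(clipboard))
--
--     return ' '.join(manipulated_string)
-- ===== SOURCE B (Python) =====
-- def get_word_list(string):
--     string = string.replace('[', ' [')
--     string = string.replace(']', '] ')
--     return string.split()
--
-- def challenge(string):
--     COPY, PASTE, CLEAR = "[CTRL+C]", "[CTRL+V]", "[CTRL+X]"
--     words = get_word_list(string)
--     # pass 1: up to (not including) the first copy; pastes are ignored here
--     clip_words, out = [], []
--     i, n = 0, len(words)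
--     while i < n and words[i] != COPY:
--         w = words[i]
--         if w == CLEAR:
--             clip_words = []
--         elif w != PASTE:
--             clip_words.append(w)
--             out.append(w)
--         i += 1
--     if i == n:                     # no copy command at all
--         return ' '.join(out)
--     clip = ' '.join(clip_words)    # clipboard frozen as a string
--     # pass 2: after the first copy
--     for w in words[i + 1:]:
--         if w == CLEAR:
--             clip = ''
--         elif w == PASTE:
--             out.append(clip)
--         elif w != COPY:
--             out.append(w)
--     return ' '.join(out)
-- ===== Notes on version B (the rewrite author's own statement) =====
-- stated objective: alternative
-- what changed: Replaces A's single-pass simulation with a copy_command_hit flag and a mutable clipboard word list by a two-pass decomposition: a prefix scan up to the first [CTRL+C] that builds the clipboard and output, then a replay of the remaining tokens with the clipboard frozen into a string (cleared to '' on [CTRL+X]).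
import Mathlib
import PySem

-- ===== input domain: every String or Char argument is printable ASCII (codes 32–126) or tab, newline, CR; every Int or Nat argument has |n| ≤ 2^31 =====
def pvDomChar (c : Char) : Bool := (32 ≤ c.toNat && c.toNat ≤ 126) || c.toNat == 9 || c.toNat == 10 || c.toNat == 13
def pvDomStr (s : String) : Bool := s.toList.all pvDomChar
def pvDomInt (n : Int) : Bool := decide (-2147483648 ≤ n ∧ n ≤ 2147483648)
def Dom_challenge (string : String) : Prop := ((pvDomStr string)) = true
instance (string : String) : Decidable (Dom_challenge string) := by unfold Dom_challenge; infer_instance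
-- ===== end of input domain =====

-- B replaces A's single-pass flag/list simulation by a two-pass decomposition (prefix scan up to the
-- first copy, then replay with a frozen-then-clearable clipboard string); objective: alternative, same cost.

-- ===== PORT A =====
def getWordList (string : String) : List String :=
  let string := PySem.Str.replace string "[" " ["
  let string := PySem.Str.replace string "]" "] "
  PySem.Str.split₀ string

-- one iteration of A's for-loop; state = (copy_command_hit, clipboard, manipulated_string)
def stepA (st : Bool × List String × List String) (word : String) : Bool × List String × List String :=
  let hit := st.1
  let clipboard := if word == "[CTRL+X]" then [] else st.2.1
  let (clipboard, manip) :=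
    if word != "[CTRL+C]" && word != "[CTRL+X]" && word != "[CTRL+V]" then
      ((if !hit then clipboard ++ [word] else clipboard), st.2.2 ++ [word])
    else (clipboard, st.2.2)
  if word == "[CTRL+C]" then (true, clipboard, manip)
  else if word == "[CTRL+V]" && hit then (hit, clipboard, manip ++ [PySem.Str.join " " clipboard])
  else (hit, clipboard, manip)

def challenge (string : String) : String :=
  let st := (getWordList string).foldl stepA (false, [], [])
  PySem.Str.join " " st.2.2

-- ===== PORT B =====
def getWordListAlt (string : String) : List String :=
  let string := PySem.Str.replace string "[" " ["
  let string := PySem.Str.replace string "]" "] "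
  PySem.Str.split₀ string

-- B's pass 1 (the while loop): scan until the first "[CTRL+C]"; returns (clip_words, out, rest-after-copy?)
def altPass1 (clip out : List String) : List String → List String × List String × Option (List String)
  | [] => (clip, out, none)
  | w :: ws =>
    if w == "[CTRL+C]" then (clip, out, some ws)
    else if w == "[CTRL+X]" then altPass1 [] out ws
    else if w == "[CTRL+V]" then altPass1 clip out ws
    else altPass1 (clip ++ [w]) (out ++ [w]) ws

-- B's pass 2 loop body; state = (clip string, out)
def stepB (st : String × List String) (w : String) : String × List String :=
  if w == "[CTRL+X]" then ("", st.2)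
  else if w == "[CTRL+V]" then (st.1, st.2 ++ [st.1])
  else if w != "[CTRL+C]" then (st.1, st.2 ++ [w])
  else st

def challenge_alt (string : String) : String :=
  let words := getWordListAlt string
  match altPass1 [] [] words with
  | (_, out, none) => PySem.Str.join " " out
  | (clipWords, out, some rest) =>
      let clip := PySem.Str.join " " clipWords
      PySem.Str.join " " (rest.foldl stepB (clip, out)).2

-- ===== PRECONDITION & SPEC =====
def Spec_challenge (string : String) (out : String) : Prop := out = challenge_alt string
instance (string : String) (out : String) : Decidable (Spec_challenge string out) := by unfold Spec_challenge; infer_instance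

-- ===== CLAIM (what is proved, stated in full; the proofs are below) =====
def Claim_equal_challenge : Prop := ∀ (string : String), Dom_challenge string → Spec_challenge string (challenge string)

-- ===== LEMMAS AND PROOFS =====

-- after the first copy, A's fold (hit = true) and B's pass-2 fold agree on the output list,
-- with B's clipboard string = ' '.join of A's clipboard list
theorem phase2_eq (ws : List String) : ∀ (clip out : List String),
    (ws.foldl stepA (true, clip, out)).2.2
      = (ws.foldl stepB (PySem.Str.join " " clip, out)).2 := by
  induction ws with
  | nil => intro clip out; rfl
  | cons w ws ih =>
    intro clip out
    simp only [List.foldl_cons]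
    by_cases hx : w = "[CTRL+X]"
    · subst hx
      simpa [stepA, stepB] using ih [] out
    · by_cases hc : w = "[CTRL+C]"
      · subst hc; simpa [stepA, stepB] using ih clip out
      · by_cases hv : w = "[CTRL+V]"
        · subst hv
          simpa [stepA, stepB] using ih clip (out ++ [PySem.Str.join " " clip])
        · simpa [stepA, stepB, hx, hc, hv] using ih clip (out ++ [w])

-- before the first copy, A's fold equals B's pass 1 followed (if a copy was hit) by B's pass 2
theorem phase1_eq (ws : List String) : ∀ (clip out : List String),
    (ws.foldl stepA (false, clip, out)).2.2
      = (match altPass1 clip out ws with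
         | (_, out', none) => out'
         | (clipW, out', some rest) =>
             (rest.foldl stepB (PySem.Str.join " " clipW, out')).2) := by
  induction ws with
  | nil => intro clip out; rfl
  | cons w ws ih =>
    intro clip out
    simp only [List.foldl_cons]
    by_cases hc : w = "[CTRL+C]"
    · subst hc
      have := phase2_eq ws clip out
      simpa [stepA, altPass1] using this
    · by_cases hx : w = "[CTRL+X]"
      · subst hx
        simpa [stepA, altPass1] using ih [] out
      · by_cases hv : w = "[CTRL+V]"
        · subst hv
          simpa [stepA, altPass1] using ih clip out
        · simpa [stepA, altPass1, hc, hx, hv] using ih (clip ++ [w]) (out ++ [w])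

-- ===== VERDICT (by name: the statement is the Claim_ definition above) =====
theorem challenge_spec : Claim_equal_challenge := by
  intro string _
  unfold Spec_challenge challenge challenge_alt
  have h := phase1_eq (getWordList string) [] []
  have hwl : getWordListAlt string = getWordList string := rfl
  rw [hwl]
  rcases hh : altPass1 [] [] (getWordList string) with ⟨clipW, out', rest⟩
  rw [hh] at h
  cases rest with
  | none => simp only [hh, h]
  | some rest => simp only [hh, h]
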